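-- pv_equiv track=rewrite | github.com/ekg/haiku-generator | src/local_haiku_ngram.py | _count_streams
-- ===== SOURCE A (Python) =====
-- from collections import Counter, defaultdict
-- from typing import Iterable, Mapping, Sequence
--
-- def _count_streams(
--     streams: Sequence[Sequence[str]], effective_order: int
-- ) -> dict[int, dict[tuple[str, ...], Counter[str]]]:
--     counts: dict[int, dict[tuple[str, ...], Counter[str]]] = {
--         order: defaultdict(Counter) for order in range(1, effective_order + 1)
--     }
--     for stream in streams:
--         for index, token in enumerate(stream):
--             for order in range(1, effective_order + 1):
--                 context_size = order - 1
--                 if index < context_size: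
--                     continue
--                 context = tuple(stream[index - context_size : index])
--                 counts[order][context][token] += 1
--     return {order: dict(contexts) for order, contexts in counts.items()}
-- ===== SOURCE B (Python) =====
-- from collections import Counter, defaultdict
--
--
-- def _count_streams(streams, effective_order):
--     def table(order):
--         contexts = defaultdict(Counter)
--         for stream in streams:
--             if len(stream) < order:
--                 continue
--             for *context, token in zip(*(stream[j:] for j in range(order))):
--                 contexts[tuple(context)][token] += 1
--         return dict(contexts)
--
--     return {order: table(order) for order in range(1, effective_order + 1)}
-- ===== Notes on version B (the rewrite author's own statement) =====
-- stated objective: alternative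
-- what changed: B inverts the loop nest (order becomes the outermost loop, building one fresh defaultdict(Counter) table per order) and enumerates sliding windows of each stream directly via zip of shifted slices, instead of A's per-token inner loop over all orders updating one preinitialized dict of orders with guarded slicing.
import Mathlib
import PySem

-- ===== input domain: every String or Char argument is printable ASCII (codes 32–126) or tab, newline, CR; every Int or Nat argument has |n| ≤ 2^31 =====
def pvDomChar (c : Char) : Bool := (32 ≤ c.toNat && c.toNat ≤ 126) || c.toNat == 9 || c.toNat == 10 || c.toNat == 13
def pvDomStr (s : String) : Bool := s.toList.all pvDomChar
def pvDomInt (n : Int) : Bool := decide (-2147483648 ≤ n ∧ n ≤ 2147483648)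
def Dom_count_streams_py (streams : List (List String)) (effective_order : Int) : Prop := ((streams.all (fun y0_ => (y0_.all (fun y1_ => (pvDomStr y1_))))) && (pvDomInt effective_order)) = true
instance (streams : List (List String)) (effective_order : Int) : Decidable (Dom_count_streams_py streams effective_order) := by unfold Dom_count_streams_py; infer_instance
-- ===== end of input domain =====

-- B inverts the loop nest (order outermost, one fresh table per order) and enumerates sliding
-- windows of each stream directly, instead of A's per-token inner loop over all orders updating a
-- preinitialized dict of orders; objective: alternative decomposition, same asymptotic cost.

-- ===== PORT A =====
-- `counts[order][context][token] += 1` on the preinitialized outer dict is ported with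
-- `Dict.modify order Dict.empty`: `order` is always a key of `counts` (it is preinitialized for
-- every `order` the inner loop visits), so the default is never consulted and the plain-dict
-- lookup semantics is exact on every reachable state.
def count_streams_py (streams : List (List String)) (effective_order : Int) :
    List (Int × List (List String × List (String × Int))) :=
  let counts : PySem.Dict Int (PySem.Dict (List String) (PySem.Dict String Int)) :=
    (PySem.List.pyRange 1 (effective_order + 1)).foldl
      (fun d o => d.insert o PySem.Dict.empty) PySem.Dict.empty
  let final := streams.foldl (fun counts stream =>
    (PySem.List.enumerate stream).foldl (fun counts p =>
      (PySem.List.pyRange 1 (effective_order + 1)).foldl (fun counts o =>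
        if p.1 < o - 1 then counts
        else counts.modify o PySem.Dict.empty (fun ctxs =>
          ctxs.modify (PySem.List.slice stream (some (p.1 - (o - 1))) (some p.1)) PySem.Dict.empty
            (fun cnt => cnt.modify p.2 0 (· + 1)))) counts) counts) counts
  final.items.map (fun q => (q.1, q.2.items.map (fun r => (r.1, r.2.items))))

-- ===== PORT B =====
-- port of `zip(*(stream[j:] for j in range(order)))` unpacked as `*context, token`:
-- the sliding windows of length k, each split into its first k-1 elements and its last one
def pvWindows (k : Nat) : List String → List (List String × String)
  | [] => []
  | x :: t =>
    if (x :: t).length < k then []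
    else ((x :: t).take (k - 1), (x :: t).getD (k - 1) "") :: pvWindows k t

def count_streams_py_alt (streams : List (List String)) (effective_order : Int) :
    List (Int × List (List String × List (String × Int))) :=
  (PySem.List.pyRange 1 (effective_order + 1)).map (fun o =>
    (o, (streams.foldl (fun ctxs s =>
            if PySem.List.len s < o then ctxs
            else (pvWindows o.toNat s).foldl (fun ctxs w =>
              ctxs.modify w.1 PySem.Dict.empty (fun cnt => cnt.modify w.2 0 (· + 1))) ctxs)
          PySem.Dict.empty).items.map (fun r => (r.1, r.2.items))))

-- ===== PRECONDITION & SPEC =====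
def Spec_count_streams_py (streams : List (List String)) (effective_order : Int) (out : List (Int × List (List String × List (String × Int)))) : Prop := out = count_streams_py_alt streams effective_order
instance (streams : List (List String)) (effective_order : Int) (out : List (Int × List (List String × List (String × Int)))) : Decidable (Spec_count_streams_py streams effective_order out) := by unfold Spec_count_streams_py; infer_instance

-- ===== CLAIM (what is proved, stated in full; the proofs are below) =====
def Claim_equal_count_streams_py : Prop := ∀ (streams : List (List String)) (effective_order : Int), Dom_count_streams_py streams effective_order → Spec_count_streams_py streams effective_order (count_streams_py streams effective_order)

-- ===== LEMMAS AND PROOFS =====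

-- pyRange with step 1 has no duplicates
theorem pvNodup_pyRange (a b : Int) : (PySem.List.pyRange a b).Nodup := by
  obtain ⟨n, hn⟩ : ∃ n : Nat, (b - a).toNat = n := ⟨_, rfl⟩
  induction n generalizing a with
  | zero =>
    have h : PySem.List.pyRange a b = [] := by
      apply List.eq_nil_iff_forall_not_mem.mpr
      intro x hx
      rw [PySem.List.mem_pyRange_one] at hx
      omega
    rw [h]; exact List.nodup_nil
  | succ n ih =>
    rw [PySem.List.pyRange_one_cons (by omega)]
    refine List.nodup_cons.mpr ⟨?_, ih (a + 1) (by omega)⟩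
    intro hm
    rw [PySem.List.mem_pyRange_one] at hm
    omega

-- a fold whose every step preserves the key list preserves it overall
theorem pvFoldl_keys_fixed {κ ν α : Type} [BEq κ] (l : List α)
    (F : PySem.Dict κ ν → α → PySem.Dict κ ν) (K : List κ)
    (h : ∀ d x, x ∈ l → d.keys = K → (F d x).keys = K) :
    ∀ d, d.keys = K → (l.foldl F d).keys = K := by
  induction l with
  | nil => intro d hd; simpa using hd
  | cons x t ih =>
    intro d hd
    exact ih (fun d' y hy => h d' y (List.mem_cons_of_mem _ hy))
      (F d x) (h d x (List.mem_cons_self) hd)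

-- simulation of a dict-valued fold at one key
theorem pvFoldl_getD_sim {κ ν α : Type} [BEq κ] (l : List α)
    (F : PySem.Dict κ ν → α → PySem.Dict κ ν) (G : ν → α → ν) (k : κ) (d0 : ν)
    (h : ∀ d x, x ∈ l → (F d x).getD k d0 = G (d.getD k d0) x) :
    ∀ d, (l.foldl F d).getD k d0 = l.foldl G (d.getD k d0) := by
  induction l with
  | nil => intro d; rfl
  | cons x t ih =>
    intro d
    rw [List.foldl_cons, List.foldl_cons,
      ih (fun d' y hy => h d' y (List.mem_cons_of_mem _ hy)) (F d x),
      h d x (List.mem_cons_self)]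

-- lookup at k after a fold of guarded modifies over a key list not containing k
theorem pvFoldl_cond_modify_getD_notmem {ν : Type} (R : List Int) (Q : Int → Prop)
    [DecidablePred Q] (f : Int → ν → ν) (d0 : ν) (k : Int) :
    ∀ (c : PySem.Dict Int ν), k ∉ R →
      (R.foldl (fun c o => if Q o then c else c.modify o d0 (f o)) c).getD k d0 =
        c.getD k d0 := by
  induction R with
  | nil => intro c _; rfl
  | cons o t ih =>
    intro c hk
    rw [List.foldl_cons, ih _ (fun h => hk (List.mem_cons_of_mem _ h))]
    by_cases hq : Q o
    · rw [if_pos hq]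
    · rw [if_neg hq, PySem.Dict.getD_modify_of_ne _ d0 _
        (by intro h; exact hk (h ▸ List.mem_cons_self))]

-- lookup at k ∈ R after the same fold, R without duplicates
theorem pvFoldl_cond_modify_getD {ν : Type} (R : List Int) (Q : Int → Prop)
    [DecidablePred Q] (f : Int → ν → ν) (d0 : ν) (k : Int) :
    ∀ (c : PySem.Dict Int ν), R.Nodup → k ∈ R →
      (R.foldl (fun c o => if Q o then c else c.modify o d0 (f o)) c).getD k d0 =
        if Q k then c.getD k d0 else f k (c.getD k d0) := by
  induction R with
  | nil => intro c _ hk; exact absurd hk (List.not_mem_nil)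
  | cons o t ih =>
    intro c hnd hk
    rw [List.foldl_cons]
    rcases List.mem_cons.mp hk with h | h
    · subst h
      rw [pvFoldl_cond_modify_getD_notmem t Q f d0 k _ (List.nodup_cons.mp hnd).1]
      by_cases hq : Q k
      · rw [if_pos hq, if_pos hq]
      · rw [if_neg hq, if_neg hq, PySem.Dict.getD_modify_self]
    · have hne : k ≠ o := by
        intro he; exact (List.nodup_cons.mp hnd).1 (he ▸ h)
      rw [ih _ (List.nodup_cons.mp hnd).2 h]
      by_cases hq : Q o
      · rw [if_pos hq]
      · rw [if_neg hq, PySem.Dict.getD_modify_of_ne _ d0 _ hne]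

-- the initial dict of A maps every key to the empty inner dict
theorem pvGetD_foldl_insert_const {κ ν : Type} [BEq κ] [LawfulBEq κ] [DecidableEq κ]
    (R : List κ) (v : ν) :
    ∀ (d : PySem.Dict κ ν), (∀ x, d.getD x v = v) → ∀ k,
      (R.foldl (fun d o => d.insert o v) d).getD k v = v := by
  induction R with
  | nil => intro d hd k; exact hd k
  | cons o t ih =>
    intro d hd k
    refine ih (d.insert o v) (fun x => ?_) k
    rw [PySem.Dict.getD_insert]
    split
    · rfl
    · exact hd x

-- windows as a map over starting offsets
theorem pvWindows_eq (k : Nat) (hk : 1 ≤ k) :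
    ∀ s : List String, pvWindows k s =
      (List.range (s.length + 1 - k)).map
        (fun m => ((s.drop m).take (k - 1), (s.drop m).getD (k - 1) "")) := by
  intro s
  induction s with
  | nil =>
    have h0 : @List.length String [] + 1 - k = 0 := by simp; omega
    rw [h0, List.range_zero, List.map_nil, pvWindows]
  | cons x t ih =>
    by_cases h : (x :: t).length < k
    · have h0 : (x :: t).length + 1 - k = 0 := by omega
      rw [h0, List.range_zero, List.map_nil, pvWindows, if_pos h]
    · have h1 : (x :: t).length + 1 - k = (t.length + 1 - k) + 1 := by
        simp only [List.length_cons] at h ⊢; omega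
      rw [pvWindows, if_neg h, h1, List.range_succ_eq_map, List.map_cons, List.map_map, ih]
      refine congrArg₂ (· :: ·) (by simp) ?_
      apply List.map_congr_left
      intro m _
      simp only [Function.comp_apply, Nat.succ_eq_add_one, List.drop_succ_cons]

-- filtering a range by a lower bound
theorem pvFilter_range (n c : Nat) :
    (List.range n).filter (fun m => decide (c ≤ m)) = (List.range (n - c)).map (· + c) := by
  induction n with
  | zero => simp
  | succ n ih =>
    rw [List.range_succ, List.filter_append, ih]
    by_cases h : c ≤ n
    · have h1 : n + 1 - c = (n - c) + 1 := by omega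
      rw [h1, List.range_succ, List.map_append]
      simp only [List.filter_cons, decide_eq_true_eq, h, if_pos, List.filter_nil,
        List.map_cons, List.map_nil]
      have hnc : n - c + c = n := by omega
      simp [hnc]
    · have h1 : n + 1 - c = 0 := by omega
      have h2 : n - c = 0 := by omega
      simp [h1, h2, h]

-- a stream shorter than the window length has no windows
theorem pvWindows_nil_of_lt (k : Nat) (s : List String) (h : s.length < k) :
    pvWindows k s = [] := by
  cases s with
  | nil => rfl
  | cons x t => rw [pvWindows, if_pos h]

-- the per-stream A-loop for a fixed order equals the B window loop
theorem pvStream_eq (k : Nat) (hk : 1 ≤ k) (s : List String)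
    (t0 : PySem.Dict (List String) (PySem.Dict String Int)) :
    (PySem.List.enumerate s).foldl (fun t p =>
        if p.1 < (k : Int) - 1 then t
        else t.modify (PySem.List.slice s (some (p.1 - ((k : Int) - 1))) (some p.1))
          PySem.Dict.empty (fun cnt => cnt.modify p.2 0 (· + 1))) t0
    = (pvWindows k s).foldl (fun t w =>
        t.modify w.1 PySem.Dict.empty (fun cnt => cnt.modify w.2 0 (· + 1))) t0 := by
  have hlen : PySem.List.len s = ((s.length : Nat) : Int) := by simp [PySem.List.len]
  have h1 : (PySem.List.enumerate s).foldl (fun t p =>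
        if p.1 < (k : Int) - 1 then t
        else t.modify (PySem.List.slice s (some (p.1 - ((k : Int) - 1))) (some p.1))
          PySem.Dict.empty (fun cnt => cnt.modify p.2 0 (· + 1))) t0
      = (List.range s.length).foldl (fun t (m : Nat) =>
          if (m : Int) < (k : Int) - 1 then t
          else t.modify (PySem.List.slice s (some ((m : Int) - ((k : Int) - 1))) (some (m : Int)))
            PySem.Dict.empty
              (fun cnt => cnt.modify (PySem.List.pyGetD s (m : Int) "") 0 (· + 1))) t0 := by
    simp only [PySem.List.enumerate_eq_map_pyRange s "", hlen,
      PySem.List.pyRange_zero_natCast, List.foldl_map]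
  have h2 : (List.range s.length).foldl (fun t (m : Nat) =>
          if (m : Int) < (k : Int) - 1 then t
          else t.modify (PySem.List.slice s (some ((m : Int) - ((k : Int) - 1))) (some (m : Int)))
            PySem.Dict.empty
              (fun cnt => cnt.modify (PySem.List.pyGetD s (m : Int) "") 0 (· + 1))) t0
      = (List.range s.length).foldl (fun t m =>
          if k - 1 ≤ m then
            t.modify ((s.drop (m - (k - 1))).take (k - 1)) PySem.Dict.empty
              (fun cnt => cnt.modify (s.getD m "") 0 (· + 1))
          else t) t0 := by
    apply PySem.List.foldl_congr_mem
    intro acc m _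
    by_cases hc : k - 1 ≤ m
    · rw [if_pos hc, if_neg (by omega)]
      have h3 : (m : Int) - ((k : Int) - 1) = ((m - (k - 1) : Nat) : Int) := by omega
      have h4 : m - (m - (k - 1)) = k - 1 := by omega
      rw [h3, PySem.List.slice_natCast, h4, PySem.List.pyGetD_natCast]
    · rw [if_neg hc, if_pos (by omega)]
  have h3 : (List.range s.length).foldl (fun t m =>
          if k - 1 ≤ m then
            t.modify ((s.drop (m - (k - 1))).take (k - 1)) PySem.Dict.empty
              (fun cnt => cnt.modify (s.getD m "") 0 (· + 1))
          else t) t0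
      = (List.range (s.length - (k - 1))).foldl (fun t m =>
          t.modify ((s.drop (m + (k - 1) - (k - 1))).take (k - 1)) PySem.Dict.empty
            (fun cnt => cnt.modify (s.getD (m + (k - 1)) "") 0 (· + 1))) t0 := by
    rw [PySem.List.foldl_ite_eq_foldl_filter (fun m => k - 1 ≤ m), pvFilter_range,
      List.foldl_map]
  have h5 : (List.range (s.length - (k - 1))).foldl (fun t m =>
          t.modify ((s.drop (m + (k - 1) - (k - 1))).take (k - 1)) PySem.Dict.empty
            (fun cnt => cnt.modify (s.getD (m + (k - 1)) "") 0 (· + 1))) t0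
      = (pvWindows k s).foldl (fun t w =>
          t.modify w.1 PySem.Dict.empty (fun cnt => cnt.modify w.2 0 (· + 1))) t0 := by
    rw [pvWindows_eq k hk s, List.foldl_map]
    have hn : s.length + 1 - k = s.length - (k - 1) := by omega
    rw [hn]
    apply PySem.List.foldl_congr_mem
    intro acc m _
    have h6 : m + (k - 1) - (k - 1) = m := by omega
    have h7 : (s.drop m).getD (k - 1) "" = s.getD (m + (k - 1)) "" := by
      rw [List.getD_eq_getElem?_getD, List.getD_eq_getElem?_getD, List.getElem?_drop]
    rw [h6, h7]
  exact h1.trans (h2.trans (h3.trans h5))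

-- ===== VERDICT (by name: the statement is the Claim_ definition above) =====
theorem count_streams_py_spec : Claim_equal_count_streams_py := by
  intro streams eo _
  unfold Spec_count_streams_py
  simp only [count_streams_py, count_streams_py_alt]
  have hndR : (PySem.List.pyRange 1 (eo + 1)).Nodup := pvNodup_pyRange 1 (eo + 1)
  set R := PySem.List.pyRange 1 (eo + 1) with hR
  set c0 : PySem.Dict Int (PySem.Dict (List String) (PySem.Dict String Int)) :=
    R.foldl (fun d o => d.insert o PySem.Dict.empty) PySem.Dict.empty with hc0
  set cfin : PySem.Dict Int (PySem.Dict (List String) (PySem.Dict String Int)) :=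
    streams.foldl (fun counts stream =>
      (PySem.List.enumerate stream).foldl (fun counts p =>
        R.foldl (fun counts o =>
          if p.1 < o - 1 then counts
          else counts.modify o PySem.Dict.empty (fun ctxs =>
            ctxs.modify (PySem.List.slice stream (some (p.1 - (o - 1))) (some p.1)) PySem.Dict.empty
              (fun cnt => cnt.modify p.2 0 (· + 1)))) counts) counts) c0 with hcfin
  have hkeys0 : c0.keys = R := by
    rw [hc0, PySem.Dict.keys_foldl_insert_key R (fun o => o)
      (fun _ _ => PySem.Dict.empty) PySem.Dict.empty]
    simp only [PySem.Dict.keys_empty, List.map_id']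
    exact PySem.Set.ofList_eq_self_of_nodup _ hndR
  have hkeysF : cfin.keys = R := by
    rw [hcfin]
    refine pvFoldl_keys_fixed streams _ _ (fun d s _ hd => ?_) _ hkeys0
    refine pvFoldl_keys_fixed (PySem.List.enumerate s) _ _ (fun d p _ hd => ?_) d hd
    refine pvFoldl_keys_fixed R _ _ (fun d o ho hd => ?_) d hd
    by_cases hq : p.1 < o - 1
    · rw [if_pos hq, hd]
    · rw [if_neg hq, PySem.Dict.keys_modify, PySem.Dict.keys_insert_of_contains, hd]
      rw [PySem.Dict.contains_iff_mem_keys, hd]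
      exact ho
  have hgc0 : ∀ o : Int, c0.getD o PySem.Dict.empty = PySem.Dict.empty := by
    intro o
    rw [hc0]
    exact pvGetD_foldl_insert_const R PySem.Dict.empty PySem.Dict.empty
      (fun x => PySem.Dict.getD_empty x PySem.Dict.empty) o
  have hG : ∀ o ∈ R, cfin.getD o PySem.Dict.empty
      = streams.foldl (fun t s =>
          (PySem.List.enumerate s).foldl (fun t p =>
            if p.1 < o - 1 then t
            else t.modify (PySem.List.slice s (some (p.1 - (o - 1))) (some p.1)) PySem.Dict.empty
              (fun cnt => cnt.modify p.2 0 (· + 1))) t) PySem.Dict.empty := by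
    intro o ho
    have hinner : ∀ (s : List String) (p : Int × String)
        (d : PySem.Dict Int (PySem.Dict (List String) (PySem.Dict String Int))),
        ((R.foldl (fun counts o' =>
          if p.1 < o' - 1 then counts
          else counts.modify o' PySem.Dict.empty (fun ctxs =>
            ctxs.modify (PySem.List.slice s (some (p.1 - (o' - 1))) (some p.1)) PySem.Dict.empty
              (fun cnt => cnt.modify p.2 0 (· + 1)))) d).getD o PySem.Dict.empty)
        = if p.1 < o - 1 then d.getD o PySem.Dict.empty
          else (d.getD o PySem.Dict.empty).modify
            (PySem.List.slice s (some (p.1 - (o - 1))) (some p.1)) PySem.Dict.empty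
            (fun cnt => cnt.modify p.2 0 (· + 1)) := by
      intro s p d
      exact pvFoldl_cond_modify_getD R (fun o' => p.1 < o' - 1)
        (fun o' ctxs => ctxs.modify (PySem.List.slice s (some (p.1 - (o' - 1))) (some p.1))
          PySem.Dict.empty (fun cnt => cnt.modify p.2 0 (· + 1)))
        PySem.Dict.empty o d hndR ho
    have hmid : ∀ (s : List String)
        (d : PySem.Dict Int (PySem.Dict (List String) (PySem.Dict String Int))),
        (((PySem.List.enumerate s).foldl (fun counts p =>
          R.foldl (fun counts o' =>
            if p.1 < o' - 1 then counts
            else counts.modify o' PySem.Dict.empty (fun ctxs =>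
              ctxs.modify (PySem.List.slice s (some (p.1 - (o' - 1))) (some p.1)) PySem.Dict.empty
                (fun cnt => cnt.modify p.2 0 (· + 1)))) counts) d).getD o PySem.Dict.empty)
        = (PySem.List.enumerate s).foldl (fun t p =>
            if p.1 < o - 1 then t
            else t.modify (PySem.List.slice s (some (p.1 - (o - 1))) (some p.1)) PySem.Dict.empty
              (fun cnt => cnt.modify p.2 0 (· + 1))) (d.getD o PySem.Dict.empty) := by
      intro s d
      exact pvFoldl_getD_sim (PySem.List.enumerate s) _ _ o PySem.Dict.empty
        (fun d p _ => hinner s p d) d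
    rw [hcfin]
    rw [pvFoldl_getD_sim streams _
      (fun t s => (PySem.List.enumerate s).foldl (fun t p =>
        if p.1 < o - 1 then t
        else t.modify (PySem.List.slice s (some (p.1 - (o - 1))) (some p.1)) PySem.Dict.empty
          (fun cnt => cnt.modify p.2 0 (· + 1))) t)
      o PySem.Dict.empty (fun d s _ => hmid s d) c0, hgc0]
  rw [PySem.Dict.items_eq_map_keys cfin (by rw [hkeysF]; exact hndR) PySem.Dict.empty,
    hkeysF, List.map_map]
  apply List.map_congr_left
  intro o ho
  have h1o : 1 ≤ o := (PySem.List.mem_pyRange_one.mp (hR ▸ ho)).1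
  have hko : ((o.toNat : Nat) : Int) = o := Int.toNat_of_nonneg (by omega)
  have hk1 : 1 ≤ o.toNat := by omega
  simp only [Function.comp_apply]
  rw [hG o ho]
  have htab : streams.foldl (fun t s =>
        (PySem.List.enumerate s).foldl (fun t p =>
          if p.1 < o - 1 then t
          else t.modify (PySem.List.slice s (some (p.1 - (o - 1))) (some p.1)) PySem.Dict.empty
            (fun cnt => cnt.modify p.2 0 (· + 1))) t)
        (PySem.Dict.empty : PySem.Dict (List String) (PySem.Dict String Int))
      = streams.foldl (fun ctxs s =>
          if PySem.List.len s < o then ctxs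
          else (pvWindows o.toNat s).foldl (fun ctxs w =>
            ctxs.modify w.1 PySem.Dict.empty (fun cnt => cnt.modify w.2 0 (· + 1))) ctxs)
        PySem.Dict.empty := by
    apply PySem.List.foldl_congr_mem
    intro acc s _
    have hls : PySem.List.len s = ((s.length : Nat) : Int) := by simp [PySem.List.len]
    by_cases hshort : s.length < o.toNat
    · rw [if_pos (by rw [hls]; omega), ← hko, pvStream_eq o.toNat hk1 s acc,
        pvWindows_nil_of_lt o.toNat s hshort]
      rfl
    · rw [if_neg (by rw [hls]; omega), ← hko]
      exact pvStream_eq o.toNat hk1 s acc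
  rw [htab]
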